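-- pv_equiv track=rewrite | github.com/minseond/YEJI | ai/ai/scripts/compatibility_calculator.py | calc_life_path_score
-- ===== SOURCE A (Python) =====
-- LIFE_PATH_COMPATIBILITY = {
--     (1, 1): 70, (1, 2): 65, (1, 3): 85, (1, 4): 60, (1, 5): 90,
--     (1, 6): 75, (1, 7): 70, (1, 8): 80, (1, 9): 85,
--     (2, 2): 80, (2, 3): 75, (2, 4): 85, (2, 5): 65, (2, 6): 90,
--     (2, 7): 75, (2, 8): 80, (2, 9): 70,
--     (3, 3): 85, (3, 4): 60, (3, 5): 90, (3, 6): 85, (3, 7): 70,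
--     (3, 8): 65, (3, 9): 80,
--     (4, 4): 75, (4, 5): 55, (4, 6): 80, (4, 7): 85, (4, 8): 90,
--     (4, 9): 65,
--     (5, 5): 70, (5, 6): 65, (5, 7): 80, (5, 8): 75, (5, 9): 85,
--     (6, 6): 85, (6, 7): 70, (6, 8): 75, (6, 9): 90,
--     (7, 7): 80, (7, 8): 65, (7, 9): 75,
--     (8, 8): 85, (8, 9): 70,
--     (9, 9): 80,
--     # 마스터 넘버
--     (11, 11): 90, (11, 22): 85, (11, 33): 80,
--     (22, 22): 85, (22, 33): 90,
--     (33, 33): 95,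
-- }
--
-- def calc_life_path_score(num1: int, num2: int) -> int:
--     """생명수 궁합 점수 (5점 만점)"""
--     # 마스터 넘버를 기본 수로 변환
--     def reduce(n):
--         if n in (11, 22, 33):
--             return n
--         while n > 9:
--             n = sum(int(d) for d in str(n))
--         return n
--
--     n1, n2 = reduce(num1), reduce(num2)
--     key = (min(n1, n2), max(n1, n2))
--
--     base_score = LIFE_PATH_COMPATIBILITY.get(key, 70)
--     return int(base_score / 100 * 5)
-- ===== SOURCE B (Python) =====
-- # Precomputed final-score table (value = compat_percent * 5 // 100), keys as in the
-- # module dict; default pair scores 3 (= int(70/100*5)).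
-- LIFE_PATH_SCORE = {
--     (1, 1): 3, (1, 2): 3, (1, 3): 4, (1, 4): 3, (1, 5): 4,
--     (1, 6): 3, (1, 7): 3, (1, 8): 4, (1, 9): 4,
--     (2, 2): 4, (2, 3): 3, (2, 4): 4, (2, 5): 3, (2, 6): 4,
--     (2, 7): 3, (2, 8): 4, (2, 9): 3,
--     (3, 3): 4, (3, 4): 3, (3, 5): 4, (3, 6): 4, (3, 7): 3,
--     (3, 8): 3, (3, 9): 4,
--     (4, 4): 3, (4, 5): 2, (4, 6): 4, (4, 7): 4, (4, 8): 4,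
--     (4, 9): 3,
--     (5, 5): 3, (5, 6): 3, (5, 7): 4, (5, 8): 3, (5, 9): 4,
--     (6, 6): 4, (6, 7): 3, (6, 8): 3, (6, 9): 4,
--     (7, 7): 4, (7, 8): 3, (7, 9): 3,
--     (8, 8): 4, (8, 9): 3,
--     (9, 9): 4,
--     (11, 11): 4, (11, 22): 4, (11, 33): 4,
--     (22, 22): 4, (22, 33): 4,
--     (33, 33): 4,
-- }
--
--
-- def calc_life_path_score(num1: int, num2: int) -> int:
--     """Life-path compatibility score via digital-root closed form and a final-score table."""
--     def root(n):
--         if n in (11, 22, 33) or n <= 9: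
--             return n
--         return 1 + (n - 1) % 9
--
--     r1, r2 = root(num1), root(num2)
--     pair = (r1, r2) if r1 <= r2 else (r2, r1)
--     return LIFE_PATH_SCORE.get(pair, 3)
-- ===== Notes on version B (the rewrite author's own statement) =====
-- stated objective: alternative
-- what changed: B replaces the iterative stringify-and-sum-digits reduction by the digital-root closed form 1 + (n-1) % 9, and replaces the percent table plus float scoring int(base/100*5) by a single precomputed final-score table looked up directly (default 3), so B does no division and no digit loop at all.
import Mathlib
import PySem

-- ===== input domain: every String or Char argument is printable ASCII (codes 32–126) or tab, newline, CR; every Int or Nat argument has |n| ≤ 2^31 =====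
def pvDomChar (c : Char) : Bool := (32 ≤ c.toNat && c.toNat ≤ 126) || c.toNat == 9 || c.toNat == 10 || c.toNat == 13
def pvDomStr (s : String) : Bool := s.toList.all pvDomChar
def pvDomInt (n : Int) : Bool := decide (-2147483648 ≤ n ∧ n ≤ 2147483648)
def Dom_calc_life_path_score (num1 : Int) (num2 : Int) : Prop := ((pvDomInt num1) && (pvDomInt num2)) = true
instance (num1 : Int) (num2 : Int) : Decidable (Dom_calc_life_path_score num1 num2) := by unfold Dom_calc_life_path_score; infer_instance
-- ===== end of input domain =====

-- B replaces A's iterative stringify-and-sum-digits reduction by the digital-root closed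
-- form 1 + (n-1) % 9 and A's percent table + float scoring int(base/100*5) by one
-- precomputed final-score table looked up directly (alternative: no loop, no division).

-- ===== PORT A =====

-- the module-level dict LIFE_PATH_COMPATIBILITY of A's Python
-- keys are all distinct, so the Python dict literal is exactly this items list
def lifePathCompat : PySem.Dict (Int × Int) Int := PySem.Dict.mk [
  ((1, 1), 70), ((1, 2), 65), ((1, 3), 85), ((1, 4), 60), ((1, 5), 90),
  ((1, 6), 75), ((1, 7), 70), ((1, 8), 80), ((1, 9), 85),
  ((2, 2), 80), ((2, 3), 75), ((2, 4), 85), ((2, 5), 65), ((2, 6), 90),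
  ((2, 7), 75), ((2, 8), 80), ((2, 9), 70),
  ((3, 3), 85), ((3, 4), 60), ((3, 5), 90), ((3, 6), 85), ((3, 7), 70),
  ((3, 8), 65), ((3, 9), 80),
  ((4, 4), 75), ((4, 5), 55), ((4, 6), 80), ((4, 7), 85), ((4, 8), 90),
  ((4, 9), 65),
  ((5, 5), 70), ((5, 6), 65), ((5, 7), 80), ((5, 8), 75), ((5, 9), 85),
  ((6, 6), 85), ((6, 7), 70), ((6, 8), 75), ((6, 9), 90),
  ((7, 7), 80), ((7, 8), 65), ((7, 9), 75),
  ((8, 8), 85), ((8, 9), 70),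
  ((9, 9), 80),
  ((11, 11), 90), ((11, 22), 85), ((11, 33), 80),
  ((22, 22), 85), ((22, 33), 90),
  ((33, 33), 95)]

-- sum(int(d) for d in str(n)) — exact whenever the loop of A evaluates it (then n > 9, so
-- str(n) consists of digit characters only and int(d) never raises; getD 0 is never taken)
def pyDigitSum (n : Int) : Int :=
  ((PySem.Int.toChars n).map (fun c => (PySem.Int.ofChars? [c]).getD 0)).sum

-- (termination lemmas for A's while loop, cited by the port's decreasing_by)
lemma toDigitsCore_succ (b fuel n : Nat) (ds : List Char) :
    Nat.toDigitsCore b (fuel + 1) n ds =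
      if n / b = 0 then (n % b).digitChar :: ds
      else Nat.toDigitsCore b fuel (n / b) ((n % b).digitChar :: ds) := rfl

lemma toDigitsCore_eq_digits (n : Nat) : ∀ (fuel : Nat) (ds : List Char), n < fuel → 0 < n →
    Nat.toDigitsCore 10 fuel n ds = ((Nat.digits 10 n).map Nat.digitChar).reverse ++ ds := by
  induction n using Nat.strong_induction_on with
  | _ n ih =>
    intro fuel ds hf hn
    match fuel, hf with
    | fuel + 1, hf =>
      rw [toDigitsCore_succ, Nat.digits_def' (by norm_num) hn]
      by_cases h : n / 10 = 0
      · simp [h]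
      · rw [if_neg h, ih (n / 10) (Nat.div_lt_self hn (by norm_num)) fuel _ (by omega) (by omega)]
        simp

lemma toChars_pos (n : Int) (h : 0 < n) :
    PySem.Int.toChars n = ((Nat.digits 10 n.toNat).map Nat.digitChar).reverse := by
  have : ¬ n < 0 := by omega
  simp only [PySem.Int.toChars, if_neg this, Nat.toDigits]
  simpa using toDigitsCore_eq_digits n.toNat (n.toNat + 1) [] (by omega) (by omega)

lemma ofChars_digitChar (d : Nat) (h : d < 10) :
    (PySem.Int.ofChars? [Nat.digitChar d]).getD 0 = (d : Int) := by
  interval_cases d <;> decide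

lemma sum_digits_le (m : Nat) : (Nat.digits 10 m).sum ≤ m := by
  induction m using Nat.strong_induction_on with
  | _ m ih =>
    rcases Nat.eq_zero_or_pos m with h | h
    · simp [h]
    · rw [Nat.digits_def' (by norm_num) h]
      have := ih (m / 10) (Nat.div_lt_self h (by norm_num))
      simp only [List.sum_cons]
      omega

lemma sum_digits_lt (m : Nat) (h : 10 ≤ m) : (Nat.digits 10 m).sum < m := by
  rw [Nat.digits_def' (by norm_num) (by omega : 0 < m)]
  have := sum_digits_le (m / 10)
  simp only [List.sum_cons]
  omega

lemma pyDigitSum_eq (n : Int) (h : 0 < n) :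
    pyDigitSum n = ((Nat.digits 10 n.toNat).sum : Int) := by
  unfold pyDigitSum
  rw [toChars_pos n h, List.map_reverse, List.sum_reverse, List.map_map, Nat.cast_list_sum]
  refine congrArg List.sum (List.map_congr_left fun d hd => ?_)
  simp only [Function.comp_apply]
  exact ofChars_digitChar d (Nat.digits_lt_base (by norm_num) hd)

lemma pyDigitSum_toNat_lt (n : Int) (h : 9 < n) : (pyDigitSum n).toNat < n.toNat := by
  rw [pyDigitSum_eq n (by omega)]
  have := sum_digits_lt n.toNat (by omega)
  omega

-- while n > 9: n = sum(int(d) for d in str(n))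
def reduceLoopA (n : Int) : Int :=
  if _h : 9 < n then reduceLoopA (pyDigitSum n) else n
termination_by n.toNat
decreasing_by exact pyDigitSum_toNat_lt n _h

-- reduce(n) of A
def reduceA (n : Int) : Int :=
  if n = 11 ∨ n = 22 ∨ n = 33 then n else reduceLoopA n

def calc_life_path_score (num1 : Int) (num2 : Int) : Int :=
  let n1 := reduceA num1
  let n2 := reduceA num2
  let key := (min n1 n2, max n1 n2)
  let base_score := lifePathCompat.getD key 70
  -- int(base_score / 100 * 5): exact hand port — base_score is one of the dict's values
  -- (55..95, multiples of 5) or 70, for which the float product is never rounded across an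
  -- integer boundary, so int() truncation equals truncating division of base_score*5 by 100
  PySem.Int.truncdiv (base_score * 5) 100

-- ===== PORT B =====

-- B's module-level dict LIFE_PATH_SCORE: precomputed final scores, default pair scores 3
-- keys are all distinct, so the Python dict literal is exactly this items list
def lifePathScore : PySem.Dict (Int × Int) Int := PySem.Dict.mk [
  ((1, 1), 3), ((1, 2), 3), ((1, 3), 4), ((1, 4), 3), ((1, 5), 4),
  ((1, 6), 3), ((1, 7), 3), ((1, 8), 4), ((1, 9), 4),
  ((2, 2), 4), ((2, 3), 3), ((2, 4), 4), ((2, 5), 3), ((2, 6), 4),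
  ((2, 7), 3), ((2, 8), 4), ((2, 9), 3),
  ((3, 3), 4), ((3, 4), 3), ((3, 5), 4), ((3, 6), 4), ((3, 7), 3),
  ((3, 8), 3), ((3, 9), 4),
  ((4, 4), 3), ((4, 5), 2), ((4, 6), 4), ((4, 7), 4), ((4, 8), 4),
  ((4, 9), 3),
  ((5, 5), 3), ((5, 6), 3), ((5, 7), 4), ((5, 8), 3), ((5, 9), 4),
  ((6, 6), 4), ((6, 7), 3), ((6, 8), 3), ((6, 9), 4),
  ((7, 7), 4), ((7, 8), 3), ((7, 9), 3),
  ((8, 8), 4), ((8, 9), 3),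
  ((9, 9), 4),
  ((11, 11), 4), ((11, 22), 4), ((11, 33), 4),
  ((22, 22), 4), ((22, 33), 4),
  ((33, 33), 4)]

-- root(n) of B: digital-root closed form
def rootAlt (n : Int) : Int :=
  if n = 11 ∨ n = 22 ∨ n = 33 ∨ n ≤ 9 then n
  else 1 + PySem.Int.mod (n - 1) 9

def calc_life_path_score_alt (num1 : Int) (num2 : Int) : Int :=
  let r1 := rootAlt num1
  let r2 := rootAlt num2
  let pair := if r1 ≤ r2 then (r1, r2) else (r2, r1)
  lifePathScore.getD pair 3

-- ===== PRECONDITION & SPEC =====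
def Spec_calc_life_path_score (num1 : Int) (num2 : Int) (out : Int) : Prop := out = calc_life_path_score_alt num1 num2
instance (num1 : Int) (num2 : Int) (out : Int) : Decidable (Spec_calc_life_path_score num1 num2 out) := by unfold Spec_calc_life_path_score; infer_instance

-- ===== CLAIM (what is proved, stated in full; the proofs are below) =====
def Claim_equal_calc_life_path_score : Prop := ∀ (num1 : Int) (num2 : Int), Dom_calc_life_path_score num1 num2 → Spec_calc_life_path_score num1 num2 (calc_life_path_score num1 num2)

-- ===== LEMMAS AND PROOFS =====

lemma sum_digits_pos (m : Nat) (h : 0 < m) : 0 < (Nat.digits 10 m).sum := by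
  induction m using Nat.strong_induction_on with
  | _ m ih =>
    rw [Nat.digits_def' (by norm_num) h]
    simp only [List.sum_cons]
    by_cases h0 : m % 10 = 0
    · have := ih (m / 10) (Nat.div_lt_self h (by norm_num)) (by omega)
      omega
    · omega

lemma reduceLoopA_eq_aux : ∀ (k : Nat) (n : Int), n.toNat = k → 9 < n →
    reduceLoopA n = 1 + (n - 1) % 9 := by
  intro k
  induction k using Nat.strong_induction_on with
  | _ k ih =>
    intro n hk h9
    rw [reduceLoopA, dif_pos h9]
    have hs_eq := pyDigitSum_eq n (by omega)
    have hpos : 0 < pyDigitSum n := by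
      rw [hs_eq]
      exact_mod_cast sum_digits_pos n.toNat (by omega)
    have hlt := pyDigitSum_toNat_lt n h9
    have hmod : pyDigitSum n % 9 = n % 9 := by
      have hm := Nat.modEq_nine_digits_sum n.toNat
      unfold Nat.ModEq at hm
      have hcast : ((n.toNat : Int)) = n := Int.toNat_of_nonneg (by omega)
      rw [hs_eq]
      omega
    by_cases hs9 : 9 < pyDigitSum n
    · rw [ih (pyDigitSum n).toNat (by omega) (pyDigitSum n) rfl hs9]
      omega
    · rw [reduceLoopA, dif_neg hs9]
      omega

lemma reduce_eq (n : Int) : reduceA n = rootAlt n := by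
  unfold reduceA rootAlt
  by_cases hm : n = 11 ∨ n = 22 ∨ n = 33
  · rcases hm with h | h | h <;> simp [h]
  · rw [if_neg hm]
    by_cases h9 : 9 < n
    · rw [if_neg (by omega : ¬ (n = 11 ∨ n = 22 ∨ n = 33 ∨ n ≤ 9)),
        reduceLoopA_eq_aux n.toNat n rfl h9,
        PySem.Int.mod_eq_emod_of_pos (by norm_num)]
    · rw [if_pos (by omega : n = 11 ∨ n = 22 ∨ n = 33 ∨ n ≤ 9), reduceLoopA, dif_neg h9]

lemma minmax_pair (a b : Int) : (min a b, max a b) = if a ≤ b then (a, b) else (b, a) := by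
  split_ifs with h
  · rw [min_eq_left h, max_eq_right h]
  · rw [min_eq_right (by omega), max_eq_left (by omega)]

lemma get?_map_vals (f : Int → Int) :
    ∀ (l : List ((Int × Int) × Int)) (k : Int × Int),
      (PySem.Dict.mk (l.map (fun p => (p.1, f p.2)))).get? k =
        ((PySem.Dict.mk l).get? k).map f := by
  intro l
  induction l with
  | nil => intro k; rfl
  | cons p rest ih =>
    intro k
    obtain ⟨k0, v0⟩ := p
    simp only [List.map_cons, PySem.Dict.get?_mk_cons]
    by_cases h : k0 == k
    · simp [h]
    · simp [h, ih k]

set_option maxRecDepth 100000 in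
lemma score_items :
    lifePathScore.items =
      lifePathCompat.items.map (fun p => (p.1, PySem.Int.truncdiv (p.2 * 5) 100)) := by
  decide

lemma score_eq_trunc (k : Int × Int) :
    lifePathScore.getD k 3 = PySem.Int.truncdiv (lifePathCompat.getD k 70 * 5) 100 := by
  have hd : lifePathScore =
      PySem.Dict.mk (lifePathCompat.items.map (fun p => (p.1, PySem.Int.truncdiv (p.2 * 5) 100))) := by
    apply PySem.Dict.ext
    exact score_items
  rw [PySem.Dict.getD_eq_get?_getD, PySem.Dict.getD_eq_get?_getD, hd,
    get?_map_vals (fun v => PySem.Int.truncdiv (v * 5) 100) lifePathCompat.items k]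
  cases h : (PySem.Dict.mk lifePathCompat.items).get? k with
  | none => decide
  | some v => rfl

-- ===== VERDICT (by name: the statement is the Claim_ definition above) =====
theorem calc_life_path_score_spec : Claim_equal_calc_life_path_score := by
  intro num1 num2 _
  unfold Spec_calc_life_path_score calc_life_path_score calc_life_path_score_alt
  dsimp only []
  rw [reduce_eq num1, reduce_eq num2, minmax_pair, score_eq_trunc]
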